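-- pv_equiv track=rewrite | github.com/TheJoboReal/PicoPI_FreeRTOS | picoPI/src/pwm.py | generate_micro_step_sequence
-- ===== SOURCE A (Python) =====
-- def generate_micro_step_sequence(pwm_val, micro_steps):
--     """
--     Generates a step sequence for micro-stepping where PWM values increase and decrease alternately.
--
--     :param pwm_val: Maximum PWM value for 16-bit resolution (65535).
--     :param micro_steps: Number of micro-steps per full step.
--
--     :return: A list of lists representing the step sequence for micro-stepping.
--     """
--     micro_step_size = pwm_val // micro_steps  # Define the micro step size
--     step_sequence = []
--
--     # Generate the step sequence for each phase
--     # Phase 1: PWM on first pin, decreasing; PWM on second pin, increasing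
--     for i in range(micro_steps):
--         pwm_1 = pwm_val - i * micro_step_size
--         pwm_2 = i * micro_step_size
--         step_sequence.append([pwm_1, pwm_2, 0, 0])
--
--     # Phase 2: PWM on second pin, decreasing; PWM on third pin, increasing
--     for i in range(micro_steps):
--         pwm_2 = pwm_val - i * micro_step_size
--         pwm_3 = i * micro_step_size
--         step_sequence.append([0, pwm_2, pwm_3, 0])
--
--     # Phase 3: PWM on third pin, decreasing; PWM on fourth pin, increasing
--     for i in range(micro_steps):
--         pwm_3 = pwm_val - i * micro_step_size
--         pwm_4 = i * micro_step_size
--         step_sequence.append([0, 0, pwm_3, pwm_4])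
--
--     # Phase 4: PWM on fourth pin, decreasing; PWM on first pin, increasing
--     for i in range(micro_steps):
--         pwm_4 = pwm_val - i * micro_step_size
--         pwm_1 = i * micro_step_size
--         step_sequence.append([pwm_1, 0, 0, pwm_4])
--
--     return step_sequence
-- ===== SOURCE B (Python) =====
-- def generate_micro_step_sequence(pwm_val, micro_steps):
--     """Compute only phase 1 (base ramp rows); phases 2-4 are the same rows
--     rotated right by the phase index, done by list slicing."""
--     micro_step_size = pwm_val // micro_steps
--     base = [[pwm_val - i * micro_step_size, i * micro_step_size, 0, 0]
--             for i in range(micro_steps)]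
--     return [row[-p:] + row[:-p] for p in range(4) for row in base]
-- ===== Notes on version B (the rewrite author's own statement) =====
-- stated objective: simpler
-- what changed: B computes only the phase-1 ramp rows once and derives the other three phases by rotating each row right by the phase index with list slicing, instead of A's four explicit per-phase loops each writing the pin values by hand.
-- outside the precondition, e.g. on generate_micro_step_sequence(100, 0): A raises ZeroDivisionError, B raises ZeroDivisionError
import Mathlib
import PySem

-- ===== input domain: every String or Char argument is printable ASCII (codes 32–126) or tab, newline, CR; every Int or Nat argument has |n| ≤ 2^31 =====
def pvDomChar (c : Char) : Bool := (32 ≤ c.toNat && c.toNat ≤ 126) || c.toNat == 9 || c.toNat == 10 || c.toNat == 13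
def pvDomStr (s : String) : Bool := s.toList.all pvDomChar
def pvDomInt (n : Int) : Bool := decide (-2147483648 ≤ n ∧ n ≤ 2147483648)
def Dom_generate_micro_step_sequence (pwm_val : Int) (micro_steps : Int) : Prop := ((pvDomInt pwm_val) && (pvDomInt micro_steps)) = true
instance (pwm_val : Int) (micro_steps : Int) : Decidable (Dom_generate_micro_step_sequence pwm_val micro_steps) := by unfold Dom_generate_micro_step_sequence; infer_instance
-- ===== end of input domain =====

-- B computes only the phase-1 ramp rows and derives phases 2-4 by rotating each row right
-- by the phase index via slicing (objective: simpler); equal whenever micro_steps ≠ 0 (else Python raises).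

-- ===== PORT A =====
-- literal transliteration of A: four sequential loops, each appending to step_sequence
def generate_micro_step_sequence (pwm_val : Int) (micro_steps : Int) : List (List Int) :=
  let micro_step_size := PySem.Int.floordiv pwm_val micro_steps
  let step_sequence : List (List Int) := []
  -- Phase 1
  let step_sequence := (PySem.List.pyRange 0 micro_steps 1).foldl
    (fun acc i => acc ++ [[pwm_val - i * micro_step_size, i * micro_step_size, 0, 0]]) step_sequence
  -- Phase 2
  let step_sequence := (PySem.List.pyRange 0 micro_steps 1).foldl
    (fun acc i => acc ++ [[0, pwm_val - i * micro_step_size, i * micro_step_size, 0]]) step_sequence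
  -- Phase 3
  let step_sequence := (PySem.List.pyRange 0 micro_steps 1).foldl
    (fun acc i => acc ++ [[0, 0, pwm_val - i * micro_step_size, i * micro_step_size]]) step_sequence
  -- Phase 4
  let step_sequence := (PySem.List.pyRange 0 micro_steps 1).foldl
    (fun acc i => acc ++ [[i * micro_step_size, 0, 0, pwm_val - i * micro_step_size]]) step_sequence
  step_sequence

-- ===== PORT B =====
-- literal transliteration of Source B: base comprehension as map, the double comprehension as
-- flatMap over range(4) of a map over base, row[-p:] + row[:-p] as PySem.List.slice
def generate_micro_step_sequence_alt (pwm_val : Int) (micro_steps : Int) : List (List Int) :=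
  let micro_step_size := PySem.Int.floordiv pwm_val micro_steps
  let base := (PySem.List.pyRange 0 micro_steps 1).map
    (fun i => [pwm_val - i * micro_step_size, i * micro_step_size, 0, 0])
  (PySem.List.pyRange 0 4 1).flatMap
    (fun p => base.map (fun row =>
      PySem.List.slice row (some (-p)) none ++ PySem.List.slice row none (some (-p))))

-- ===== PRECONDITION & SPEC =====
-- Pre_ excludes exactly micro_steps = 0, where Python A raises ZeroDivisionError.
def Pre_generate_micro_step_sequence (pwm_val : Int) (micro_steps : Int) : Prop := micro_steps ≠ 0
instance (pwm_val : Int) (micro_steps : Int) : Decidable (Pre_generate_micro_step_sequence pwm_val micro_steps) := by unfold Pre_generate_micro_step_sequence; infer_instance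
def pvWitness_generate_micro_step_sequence : Int × Int := (100, 4)
def Spec_generate_micro_step_sequence (pwm_val : Int) (micro_steps : Int) (out : List (List Int)) : Prop := out = generate_micro_step_sequence_alt pwm_val micro_steps
instance (pwm_val : Int) (micro_steps : Int) (out : List (List Int)) : Decidable (Spec_generate_micro_step_sequence pwm_val micro_steps out) := by unfold Spec_generate_micro_step_sequence; infer_instance

-- ===== CLAIM =====
def Claim_equal_generate_micro_step_sequence : Prop := ∀ (pwm_val : Int) (micro_steps : Int), Dom_generate_micro_step_sequence pwm_val micro_steps → Pre_generate_micro_step_sequence pwm_val micro_steps → Spec_generate_micro_step_sequence pwm_val micro_steps (generate_micro_step_sequence pwm_val micro_steps)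

-- ===== LEMMAS AND PROOFS =====

-- ===== VERDICT =====
theorem generate_micro_step_sequence_spec : Claim_equal_generate_micro_step_sequence := by
  intro pwm_val micro_steps _ _
  show generate_micro_step_sequence pwm_val micro_steps = generate_micro_step_sequence_alt pwm_val micro_steps
  simp only [generate_micro_step_sequence, generate_micro_step_sequence_alt,
    PySem.List.foldl_append_singleton_eq_map, List.nil_append]
  show _ = _ ++ (_ ++ (_ ++ (_ ++ [])))
  simp only [List.map_map, List.append_nil, List.append_assoc]
  rfl
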